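-- pv_equiv track=rewrite | github.com/yumichael/g-research-ffc2018 | helper/[unused] helpers.py | hist_consec
-- ===== SOURCE A (Python) =====
-- from collections import Counter
--
-- def consec(a, e, v=None):
--     if v is None:
--         v = a
--     agg = [0]
--     aggv = [[]]
--     for x, c in zip(a, v):
--         if x == e:
--             agg[-1] += 1
--             aggv[-1].append(c)
--         elif agg[-1] != 0:
--             agg.append(0)
--             aggv.append([])
--     if agg[-1] == 0:
--         agg.pop()
--         aggv.pop()
--     return agg, aggv
--
-- def hist_consec(a, e, v=None):
--     agg, aggv = consec(a, e, v)
--     if v is None: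
--         cnt = Counter(agg)
--         return [list(_) for _ in zip(*sorted((n, c * n) for n, c in cnt.items()))]
--     hist = Counter()
--     for n, values in zip(agg, aggv):
--         hist[n] += sum(values)
--     ns = sorted(set(agg))
--     h = [hist[n] for n in ns]
--     return ns, h
-- ===== SOURCE B (Python) =====
-- from collections import Counter
--
-- def hist_consec(a, e, v=None):
--     # One pass: histogram run-length -> accumulated weight, built directly.
--     # Unit weights make the v-None case "count * length" automatically.
--     none = v is None
--     w = [1] * len(a) if none else v
--     hist = Counter()
--     run_len = run_sum = 0
--     for x, c in zip(a, w):
--         if x == e: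
--             run_len += 1
--             run_sum += c
--         elif run_len:
--             hist[run_len] += run_sum
--             run_len = run_sum = 0
--     if run_len:
--         hist[run_len] += run_sum
--     if none:
--         return [list(t) for t in zip(*sorted(hist.items()))]
--     ns = sorted(hist)
--     return ns, [hist[n] for n in ns]
-- ===== Notes on version B (the rewrite author's own statement) =====
-- stated objective: simpler
-- what changed: Replaces the two-phase design (build parallel run lists agg/aggv with a sentinel slot and pop, then re-count them into a Counter per branch) by a single pass that accumulates a Counter run-length -> weight directly, with unit weights unifying the v-None branch (count*length) with the v-given branch (sum of v over runs).
import Mathlib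
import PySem

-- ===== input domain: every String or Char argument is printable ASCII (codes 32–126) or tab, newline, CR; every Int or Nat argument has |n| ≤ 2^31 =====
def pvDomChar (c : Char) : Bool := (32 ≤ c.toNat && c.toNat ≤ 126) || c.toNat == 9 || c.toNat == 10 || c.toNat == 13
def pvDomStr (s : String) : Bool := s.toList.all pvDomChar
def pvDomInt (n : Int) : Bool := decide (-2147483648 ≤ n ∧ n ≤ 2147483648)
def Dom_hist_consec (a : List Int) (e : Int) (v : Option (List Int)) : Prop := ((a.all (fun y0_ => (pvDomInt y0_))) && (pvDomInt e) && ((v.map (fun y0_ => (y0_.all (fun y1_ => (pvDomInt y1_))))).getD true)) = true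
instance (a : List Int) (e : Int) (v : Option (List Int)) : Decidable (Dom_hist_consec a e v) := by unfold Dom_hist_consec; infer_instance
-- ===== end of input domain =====

-- B replaces A's two-phase design (build run lists agg/aggv with a sentinel slot, then count
-- them into a Counter per branch) by one pass accumulating a Counter run-length -> weight
-- directly, unit weights unifying the v-None branch (objective: simpler); return value only.

-- ===== PORT A =====
-- Python mutates agg[-1]/aggv[-1] and appends at the end; the fold state keeps both lists
-- LAST-SLOT-FIRST (reversed), so each step touches the head; consecA reverses back at the end.
def stepA (e : Int) (st : List Int × List (List Int)) (p : Int × Int) :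
    List Int × List (List Int) :=
  if p.1 = e then
    ((st.1.headI + 1) :: st.1.tail, (st.2.headI ++ [p.2]) :: st.2.tail)
  else if st.1.headI ≠ 0 then
    (0 :: st.1, [] :: st.2)
  else st

def consecA (a : List Int) (e : Int) (v : Option (List Int)) :
    List Int × List (List Int) :=
  let v' := v.getD a
  let st := (a.zip v').foldl (stepA e) ([0], [[]])
  let st' := if st.1.headI = 0 then (st.1.tail, st.2.tail) else st
  (st'.1.reverse, st'.2.reverse)

def hist_consec (a : List Int) (e : Int) (v : Option (List Int)) : List (List Int) :=
  let agg := (consecA a e v).1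
  let aggv := (consecA a e v).2
  match v with
  | none =>
    let cnt := PySem.Dict.counter agg
    let pairs := PySem.List.sorted2 (cnt.items.map (fun p => (p.1, p.2 * p.1))) Prod.fst Prod.snd false
    if pairs = [] then [] else [pairs.map Prod.fst, pairs.map Prod.snd]
  | some _ =>
    let hist := (agg.zip aggv).foldl
      (fun (d : PySem.Dict Int Int) (p : Int × List Int) => d.modify p.1 0 (· + p.2.sum))
      PySem.Dict.empty
    let ns := PySem.List.sorted (PySem.Set.ofList agg) (fun x => x) false
    [ns, ns.map (fun n => hist.getD n 0)]

-- ===== PORT B =====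
def stepB (e : Int) (st : PySem.Dict Int Int × Int × Int) (p : Int × Int) :
    PySem.Dict Int Int × Int × Int :=
  if p.1 = e then (st.1, st.2.1 + 1, st.2.2 + p.2)
  else if st.2.1 ≠ 0 then (st.1.modify st.2.1 0 (· + st.2.2), 0, 0)
  else st

def hist_consec_alt (a : List Int) (e : Int) (v : Option (List Int)) : List (List Int) :=
  let w := match v with | none => List.replicate a.length 1 | some vv => vv
  let st := (a.zip w).foldl (stepB e) (PySem.Dict.empty, 0, 0)
  let hist := if st.2.1 ≠ 0 then st.1.modify st.2.1 0 (· + st.2.2) else st.1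
  match v with
  | none =>
    let pairs := PySem.List.sorted2 hist.items Prod.fst Prod.snd false
    if pairs = [] then [] else [pairs.map Prod.fst, pairs.map Prod.snd]
  | some _ =>
    let ns := PySem.List.sorted hist.keys (fun x => x) false
    [ns, ns.map (fun n => hist.getD n 0)]

-- ===== PRECONDITION & SPEC =====
def Spec_hist_consec (a : List Int) (e : Int) (v : Option (List Int)) (out : List (List Int)) : Prop := out = hist_consec_alt a e v
instance (a : List Int) (e : Int) (v : Option (List Int)) (out : List (List Int)) : Decidable (Spec_hist_consec a e v out) := by unfold Spec_hist_consec; infer_instance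

-- ===== CLAIM (what is proved, stated in full; the proofs are below) =====
def Claim_equal_hist_consec : Prop := ∀ (a : List Int) (e : Int) (v : Option (List Int)), Dom_hist_consec a e v → Spec_hist_consec a e v (hist_consec a e v)

-- ===== LEMMAS AND PROOFS =====

-- Abstract run machine: completed runs (length, value-list) in order + current run (len, vals).
def rstep (e : Int) (st : List (Int × List Int) × Int × List Int) (p : Int × Int) :
    List (Int × List Int) × Int × List Int :=
  if p.1 = e then (st.1, st.2.1 + 1, st.2.2 ++ [p.2])
  else if st.2.1 ≠ 0 then (st.1 ++ [(st.2.1, st.2.2)], 0, [])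
  else st

def runsOf (l : List (Int × Int)) (e : Int) : List (Int × List Int) :=
  let st := l.foldl (rstep e) ([], 0, [])
  if st.2.1 = 0 then st.1 else st.1 ++ [(st.2.1, st.2.2)]

-- the Counter step both ports use on a completed run
def step2 (d : PySem.Dict Int Int) (r : Int × List Int) : PySem.Dict Int Int :=
  d.modify r.1 0 (· + r.2.sum)

-- run-length-only machine (for the v = none branch, where values are irrelevant)
def lstep (e : Int) (st : List Int × Int) (x : Int) : List Int × Int :=
  if x = e then (st.1, st.2 + 1)
  else if st.2 ≠ 0 then (st.1 ++ [st.2], 0)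
  else st

def runLens (l : List Int) (e : Int) : List Int :=
  let st := l.foldl (lstep e) ([], 0)
  if st.2 = 0 then st.1 else st.1 ++ [st.2]

-- A's fold simulates the run machine
theorem foldA_eq (e : Int) (l : List (Int × Int)) (done : List (Int × List Int))
    (cl : Int) (cv : List Int) :
    l.foldl (stepA e) (cl :: (done.map Prod.fst).reverse, cv :: (done.map Prod.snd).reverse)
      = ((l.foldl (rstep e) (done, cl, cv)).2.1 ::
          ((l.foldl (rstep e) (done, cl, cv)).1.map Prod.fst).reverse,
         (l.foldl (rstep e) (done, cl, cv)).2.2 ::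
          ((l.foldl (rstep e) (done, cl, cv)).1.map Prod.snd).reverse) := by
  induction l generalizing done cl cv with
  | nil => rfl
  | cons p t ih =>
    simp only [List.foldl_cons, stepA, rstep, List.headI_cons, List.tail_cons]
    split_ifs with h1 h2
    · simpa using ih done (cl + 1) (cv ++ [p.2])
    · simpa using ih (done ++ [(cl, cv)]) 0 []
    · exact ih done cl cv

theorem consecA_eq (a : List Int) (e : Int) (v : Option (List Int)) :
    consecA a e v = ((runsOf (a.zip (v.getD a)) e).map Prod.fst,
                     (runsOf (a.zip (v.getD a)) e).map Prod.snd) := by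
  have h := foldA_eq e (a.zip (v.getD a)) [] 0 []
  simp only [List.map_nil, List.reverse_nil] at h
  simp only [consecA, runsOf, h, List.headI_cons, List.tail_cons]
  split_ifs with h1
  · simp
  · simp

-- B's fold simulates the run machine
theorem foldB_eq (e : Int) (l : List (Int × Int)) (d : PySem.Dict Int Int)
    (done : List (Int × List Int)) (cl : Int) (cv : List Int) :
    l.foldl (stepB e) (done.foldl step2 d, cl, cv.sum)
      = ((l.foldl (rstep e) (done, cl, cv)).1.foldl step2 d,
         (l.foldl (rstep e) (done, cl, cv)).2.1,
         (l.foldl (rstep e) (done, cl, cv)).2.2.sum) := by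
  induction l generalizing done cl cv with
  | nil => rfl
  | cons p t ih =>
    simp only [List.foldl_cons, stepB, rstep]
    split_ifs with h1 h2
    · have := ih done (cl + 1) (cv ++ [p.2])
      simpa using this
    · have := ih (done ++ [(cl, cv)]) 0 []
      simpa [step2] using this
    · exact ih done cl cv

theorem histB_eq (a : List Int) (e : Int) (w : List Int) :
    (let st := (a.zip w).foldl (stepB e) (PySem.Dict.empty, 0, 0)
     if st.2.1 ≠ 0 then st.1.modify st.2.1 0 (· + st.2.2) else st.1)
      = (runsOf (a.zip w) e).foldl step2 PySem.Dict.empty := by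
  have h := foldB_eq e (a.zip w) PySem.Dict.empty [] 0 []
  simp only [List.foldl_nil, List.sum_nil] at h
  simp only [h, runsOf]
  rcases eq_or_ne ((a.zip w).foldl (rstep e) ([], 0, [])).2.1 0 with hz | hz
  · simp [hz]
  · simp [hz, List.foldl_append, step2]

-- runs of a "diagonal" list: lengths from the length machine, values all f e
theorem foldMap_eq (e : Int) (f : Int → Int) (l : List Int) (done : List Int)
    (cl : Int) (hcl : 0 ≤ cl) :
    (l.map (fun x => (x, f x))).foldl (rstep e)
        (done.map (fun n => (n, List.replicate n.toNat (f e))), cl, List.replicate cl.toNat (f e))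
      = (((l.foldl (lstep e) (done, cl)).1).map (fun n => (n, List.replicate n.toNat (f e))),
         (l.foldl (lstep e) (done, cl)).2,
         List.replicate (l.foldl (lstep e) (done, cl)).2.toNat (f e)) := by
  induction l generalizing done cl with
  | nil => rfl
  | cons x t ih =>
    simp only [List.map_cons, List.foldl_cons, rstep, lstep]
    split_ifs with h1 h2
    · have hx : x = e := h1
      have hrep : List.replicate cl.toNat (f e) ++ [f x] = List.replicate (cl + 1).toNat (f e) := by
        subst hx
        have : (cl + 1).toNat = cl.toNat + 1 := by omega
        rw [this, List.replicate_succ']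
      rw [hrep]
      exact ih done (cl + 1) (by omega)
    · have := ih (done ++ [cl]) 0 (le_refl 0)
      simpa using this
    · exact ih done cl hcl

theorem runsOf_map (e : Int) (f : Int → Int) (l : List Int) :
    runsOf (l.map (fun x => (x, f x))) e
      = (runLens l e).map (fun n => (n, List.replicate n.toNat (f e))) := by
  have h := foldMap_eq e f l [] 0 (le_refl 0)
  simp only [List.map_nil, Int.toNat_zero, List.replicate_zero] at h
  simp only [runsOf, runLens, h]
  split_ifs with h1
  · rfl
  · simp

-- every recorded run length is positive
theorem lfold_inv (e : Int) (l : List Int) (done : List Int) (cl : Int)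
    (hd : ∀ n ∈ done, 0 < n) (hcl : 0 ≤ cl) :
    (∀ n ∈ (l.foldl (lstep e) (done, cl)).1, 0 < n) ∧ 0 ≤ (l.foldl (lstep e) (done, cl)).2 := by
  induction l generalizing done cl with
  | nil => exact ⟨hd, hcl⟩
  | cons x t ih =>
    simp only [List.foldl_cons, lstep]
    split_ifs with h1 h2
    · exact ih done (cl + 1) hd (by omega)
    · refine ih (done ++ [cl]) 0 ?_ (le_refl 0)
      intro n hn
      rcases List.mem_append.1 hn with h | h
      · exact hd n h
      · simp at h; omega
    · exact ih done cl hd hcl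

theorem runLens_pos (l : List Int) (e : Int) : ∀ n ∈ runLens l e, 0 < n := by
  have h := lfold_inv e l [] 0 (by simp) (le_refl 0)
  intro n hn
  simp only [runLens] at hn
  split_ifs at hn with h1
  · exact h.1 n hn
  · rcases List.mem_append.1 hn with hm | hm
    · exact h.1 n hm
    · simp at hm; subst hm; omega

-- the weight fold computes count * key
theorem getD_weight_fold (L : List Int) (d : PySem.Dict Int Int) (m : Int) :
    (L.foldl (fun d n => d.modify n 0 (· + n)) d).getD m 0
      = d.getD m 0 + (L.count m : Int) * m := by
  induction L generalizing d with
  | nil => simp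
  | cons x t ih =>
    simp only [List.foldl_cons, ih, PySem.Dict.getD_modify, List.count_cons]
    by_cases h : m = x
    · subst h; simp; ring
    · have h' : ¬ (x = m) := fun hh => h hh.symm
      simp [h, h']

theorem items_weight (L : List Int) :
    (L.foldl (fun d n => d.modify n 0 (· + n)) PySem.Dict.empty).items
      = (PySem.Dict.counter L).items.map (fun p => (p.1, p.2 * p.1)) := by
  have hkeys : (L.foldl (fun d n => d.modify n 0 (· + n)) PySem.Dict.empty).keys
      = PySem.Set.ofList L := by
    rw [PySem.Dict.keys_foldl_modify]
    simp [PySem.Set.update_nil_left]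
  have hnd : (L.foldl (fun d n => d.modify n 0 (· + n)) PySem.Dict.empty).keys.Nodup := by
    rw [hkeys]; exact PySem.Set.nodup_ofList L
  rw [PySem.Dict.items_eq_map_keys _ hnd 0, hkeys, PySem.Dict.items_counter, List.map_map]
  refine List.map_congr_left ?_
  intro k hk
  simp only [Function.comp]
  rw [getD_weight_fold]
  simp

theorem foldl_congr_mem' {α β : Type} (l : List α) (f g : β → α → β) (b : β)
    (h : ∀ x ∈ l, ∀ acc, f acc x = g acc x) : l.foldl f b = l.foldl g b := by
  induction l generalizing b with
  | nil => rfl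
  | cons x t ih =>
    simp only [List.foldl_cons]
    rw [h x (by simp)]
    exact ih _ (fun y hy acc => h y (by simp [hy]) acc)

theorem zip_self (a : List Int) : a.zip a = a.map (fun x => (x, x)) := by
  induction a with
  | nil => rfl
  | cons x t ih => simp [ih]

theorem zip_ones (a : List Int) :
    a.zip (List.replicate a.length (1 : Int)) = a.map (fun x => (x, (1 : Int))) := by
  induction a with
  | nil => rfl
  | cons x t ih => simp [List.replicate_succ, ih]

theorem zip_map_fst_snd (r : List (Int × List Int)) :
    (r.map Prod.fst).zip (r.map Prod.snd) = r := by
  induction r with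
  | nil => rfl
  | cons x t ih => simp [ih]

-- ===== VERDICT (by name: the statement is the Claim_ definition above) =====
theorem hist_consec_spec : Claim_equal_hist_consec := by
  intro a e v _
  unfold Spec_hist_consec
  cases v with
  | some vv =>
    simp only [hist_consec, hist_consec_alt, consecA_eq, Option.getD_some]
    have hB := histB_eq a e vv
    simp only at hB
    rw [hB, zip_map_fst_snd]
    have hkeys : ((runsOf (a.zip vv) e).foldl step2 PySem.Dict.empty).keys
        = PySem.Set.ofList ((runsOf (a.zip vv) e).map Prod.fst) := by
      have := PySem.Dict.keys_foldl_modify_key (l := runsOf (a.zip vv) e)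
        (key := Prod.fst) (d0 := (0 : Int))
        (f := fun (_ : PySem.Dict Int Int) (r : Int × List Int) => (· + r.2.sum))
        (d := PySem.Dict.empty)
      simpa [step2, PySem.Set.update_nil_left] using this
    rw [hkeys]
    rfl
  | none =>
    simp only [hist_consec, hist_consec_alt, consecA_eq, Option.getD_none]
    have hB := histB_eq a e (List.replicate a.length 1)
    simp only at hB
    rw [hB, zip_ones, zip_self, runsOf_map, runsOf_map]
    have hfold : ((runLens a e).map (fun n => (n, List.replicate n.toNat (1:Int)))).foldl step2 PySem.Dict.empty
        = (runLens a e).foldl (fun d n => d.modify n 0 (· + n)) PySem.Dict.empty := by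
      rw [List.foldl_map]
      refine foldl_congr_mem' _ _ _ _ ?_
      intro n hn acc
      have hpos := runLens_pos a e n hn
      have hsum : (List.replicate n.toNat (1:Int)).sum = n := by
        simp [List.sum_replicate]
        omega
      simp only [step2, hsum]
    have hfst : ((runLens a e).map (fun n => (n, List.replicate n.toNat (e:Int)))).map Prod.fst = runLens a e := by
      simp [List.map_map, Function.comp_def]
    rw [hfold, items_weight, hfst]
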